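-- pv_equiv track=rewrite | github.com/EmodinCinema/TSDS | LabWork_2/main.py | zad7
-- ===== SOURCE A (Python) =====
-- def zad7(chis: int) -> int:
--     """
--                 Введите целое число и программа преобразует его в другое:
--                 >>> zad7(565696)
--                 '253619'
--                 >>> zad7(38389696)
--                 '23282926'
--     """
--     if type(chis) != int:
--         raise Exception('Input must be int')
--     chis_long = str(chis)
--     chis_mas = []
--     otvet = ''
--
--     for char in chis_long:
--         if char in chis_mas:
--             continue
--         chis_count = chis_long.count(char)
--         chis_mas.append(char)
--         otvet += f'{chis_count}{char}'
--     return otvet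
-- ===== SOURCE B (Python) =====
-- def zad7(chis: int) -> int:
--     if type(chis) != int:
--         raise Exception('Input must be int')
--
--     def encode(s: str) -> str:
--         if not s:
--             return ''
--         rest = s.replace(s[0], '')
--         return f'{len(s) - len(rest)}{s[0]}' + encode(rest)
--
--     return encode(str(chis))
-- ===== Notes on version B (the rewrite author's own statement) =====
-- stated objective: alternative
-- what changed: Replaces the seen-list loop with str.count scans by a recursive deletion scheme: take the first character, delete all its occurrences with str.replace, derive its count from the length drop, and recurse on the shrunken string (no seen set, no counting scan, no dict).
import Mathlib
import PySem

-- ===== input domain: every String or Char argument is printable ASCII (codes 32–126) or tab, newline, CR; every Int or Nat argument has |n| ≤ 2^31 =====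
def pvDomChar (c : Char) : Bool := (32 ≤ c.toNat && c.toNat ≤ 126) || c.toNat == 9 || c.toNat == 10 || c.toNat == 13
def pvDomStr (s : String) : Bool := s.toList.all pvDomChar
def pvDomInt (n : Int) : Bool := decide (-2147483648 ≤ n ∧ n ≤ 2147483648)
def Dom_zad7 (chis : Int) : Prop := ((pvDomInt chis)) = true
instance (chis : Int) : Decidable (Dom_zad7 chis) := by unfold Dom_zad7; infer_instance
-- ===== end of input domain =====

-- B replaces A's seen-list loop with repeated str.count scans by a recursive
-- deletion scheme: emit the first character's count (the length drop after
-- str.replace deletes it) and recurse on the shrunken string (objective: alternative).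

-- ===== PORT A =====
-- A's loop over str(chis): skip seen chars, else count occurrences (a one-character
-- substring count = the character count), record char, append "<count><char>".
def zad7 (chis : Int) : String :=
  let chisLong : List Char := PySem.Int.toChars chis
  let st :=
    chisLong.foldl
      (fun (st : List Char × List Char) char =>
        if char ∈ st.1 then st
        else (st.1 ++ [char],
              st.2 ++ PySem.Int.toChars ((chisLong.count char : Nat) : Int) ++ [char]))
      ([], [])
  String.ofList st.2

-- ===== PORT B =====
-- B's recursive encode: s.replace(s[0], '') with a one-character pattern is exactly
-- the removal of every occurrence of s[0], i.e. filter (· != s[0]); the count is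
-- len(s) - len(rest).
def encodeB : List Char → List Char
  | [] => []
  | c :: s =>
    let rest := (c :: s).filter (fun x => x != c)
    PySem.Int.toChars (((c :: s).length - rest.length : Nat) : Int) ++ [c] ++ encodeB rest
termination_by l => l.length
decreasing_by
  simp only [List.filter]
  simp only [bne_self_eq_false]
  exact Nat.lt_succ_of_le (List.length_filter_le _ _)

def zad7_alt (chis : Int) : String :=
  String.ofList (encodeB (PySem.Int.toChars chis))

-- ===== PRECONDITION & SPEC =====
def Spec_zad7 (chis : Int) (out : String) : Prop := out = zad7_alt chis
instance (chis : Int) (out : String) : Decidable (Spec_zad7 chis out) := by unfold Spec_zad7; infer_instance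

-- ===== CLAIM (what is proved, stated in full; the proofs are below) =====
def Claim_equal_zad7 : Prop := ∀ (chis : Int), Dom_zad7 chis → Spec_zad7 chis (zad7 chis)

-- ===== LEMMAS AND PROOFS =====

-- the chars of l not yet in seen, first occurrences, in order
def newUniq (seen : List Char) : List Char → List Char
  | [] => []
  | c :: t => if c ∈ seen then newUniq seen t else c :: newUniq (seen ++ [c]) t

theorem foldl_seen_out (f : Char → List Char) :
    ∀ (l seen out : List Char),
      (l.foldl
        (fun (st : List Char × List Char) c =>
          if c ∈ st.1 then st else (st.1 ++ [c], st.2 ++ f c)) (seen, out)).2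
      = out ++ (newUniq seen l).flatMap f := by
  intro l
  induction l with
  | nil => intro seen out; simp [newUniq]
  | cons c t ih =>
    intro seen out
    by_cases hc : c ∈ seen
    · simp [List.foldl_cons, hc, newUniq, ih]
    · simp [List.foldl_cons, hc, newUniq, ih, List.flatMap_cons]

theorem newUniq_congr :
    ∀ (l s1 s2 : List Char), (∀ x, x ∈ s1 ↔ x ∈ s2) → newUniq s1 l = newUniq s2 l := by
  intro l
  induction l with
  | nil => intro s1 s2 _; simp [newUniq]
  | cons c t ih =>
    intro s1 s2 h
    by_cases hc : c ∈ s1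
    · simp [newUniq, hc, (h c).mp hc, ih _ _ h]
    · have hc2 : c ∉ s2 := fun hx => hc ((h c).mpr hx)
      simp only [newUniq, if_neg hc, if_neg hc2]
      refine congrArg _ (ih _ _ ?_)
      intro x; simp [h x]

theorem mem_newUniq : ∀ (l seen : List Char) (x : Char), x ∈ newUniq seen l → x ∈ l := by
  intro l
  induction l with
  | nil => intro seen x h; simp [newUniq] at h
  | cons c t ih =>
    intro seen x h
    by_cases hc : c ∈ seen
    · simp only [newUniq, if_pos hc] at h
      exact List.mem_cons_of_mem _ (ih _ _ h)
    · simp only [newUniq, if_neg hc, List.mem_cons] at h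
      rcases h with h | h
      · simp [h]
      · exact List.mem_cons_of_mem _ (ih _ _ h)

theorem newUniq_filter :
    ∀ (t seen : List Char) (c : Char),
      newUniq (seen ++ [c]) t = newUniq seen (t.filter (fun x => x != c)) := by
  intro t
  induction t with
  | nil => intro seen c; simp [newUniq]
  | cons d t ih =>
    intro seen c
    by_cases hdc : d = c
    · subst hdc
      have : d ∈ seen ++ [d] := by simp
      simp [newUniq, this, List.filter, ih]
    · have hfil : (d != c) = true := by simp [hdc]
      by_cases hd : d ∈ seen
      · have : d ∈ seen ++ [c] := by simp [hd]
        simp [newUniq, this, hd, List.filter, hfil, ih]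
      · have hd' : d ∉ seen ++ [c] := by simp [hd, hdc]
        simp only [List.filter, hfil, newUniq, if_neg hd', if_neg hd]
        refine congrArg _ ?_
        rw [← ih (seen ++ [d]) c]
        exact newUniq_congr _ _ _ (by intro x; simp; tauto)

theorem encodeB_eq :
    ∀ (l : List Char),
      encodeB l = (newUniq [] l).flatMap
        (fun c => PySem.Int.toChars ((l.count c : Nat) : Int) ++ [c]) := by
  intro l
  induction l using encodeB.induct with
  | case1 => simp [encodeB, newUniq]
  | case2 c s rest ih =>
    have hrest : rest = s.filter (fun x => x != c) := by
      simp only [rest, List.filter, bne_self_eq_false]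
    have hcount : (c :: s).length - ((c :: s).filter (fun x => x != c)).length
        = (c :: s).count c := by
      rw [← List.countP_eq_length_filter]
      have h1 : (c :: s).countP (fun x => x != c) + (c :: s).count c = (c :: s).length := by
        simpa [List.count] using
          (List.length_eq_countP_add_countP (l := c :: s) (p := fun x => x != c)).symm
      omega
    have hcnt_rest : ∀ x ∈ newUniq [] rest, rest.count x = (c :: s).count x := by
      intro x hx
      have hxrest : x ∈ rest := mem_newUniq _ _ _ hx
      have hxc : x ≠ c := by
        rw [hrest] at hxrest
        simpa using (List.of_mem_filter hxrest)
      rw [hrest, List.count_filter (by simp [hxc])]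
      exact (List.count_cons_of_ne (Ne.symm hxc)).symm
    have hnu : newUniq [] (c :: s) = c :: newUniq [] rest := by
      have hcnot : c ∉ ([] : List Char) := by simp
      simp only [newUniq, if_neg hcnot]
      rw [hrest]
      exact congrArg _ (by simpa using newUniq_filter s [] c)
    rw [encodeB]
    simp only [← hrest] at *
    rw [hnu, List.flatMap_cons, ih, hcount]
    congr 1
    exact List.flatMap_congr (by intro x hx; rw [hcnt_rest x hx])

-- ===== VERDICT (by name: the statement is the Claim_ definition above) =====
theorem zad7_spec : Claim_equal_zad7 := by
  intro chis _
  show zad7 chis = zad7_alt chis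
  have hfun : (fun (st : List Char × List Char) char =>
      if char ∈ st.1 then st
      else (st.1 ++ [char],
            st.2 ++ PySem.Int.toChars (((PySem.Int.toChars chis).count char : Nat) : Int) ++ [char]))
    = (fun (st : List Char × List Char) char =>
      if char ∈ st.1 then st
      else (st.1 ++ [char],
            st.2 ++ (PySem.Int.toChars (((PySem.Int.toChars chis).count char : Nat) : Int) ++ [char]))) := by
    funext st char
    by_cases h : char ∈ st.1 <;> simp [h, List.append_assoc]
  show String.ofList
      ((List.foldl (fun (st : List Char × List Char) char =>
          if char ∈ st.1 then st
          else (st.1 ++ [char],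
                st.2 ++ PySem.Int.toChars (((PySem.Int.toChars chis).count char : Nat) : Int) ++ [char]))
        ([], []) (PySem.Int.toChars chis)).2)
    = String.ofList (encodeB (PySem.Int.toChars chis))
  rw [hfun, foldl_seen_out, encodeB_eq]
  simp
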